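-- pv_equiv track=rewrite | github.com/y24/TestStat-CLI | utils/ReadData.py | get_daily_by_name
-- ===== SOURCE A (Python) =====
-- from collections import defaultdict
--
-- def get_daily_by_name(data):
--     date_name_count = defaultdict(lambda: defaultdict(int))
--
--     # 日付が空の行は削除
--     data = [row for row in data if len(row) > 2 and row[2] not in ("", None)]
--
--     # 結果が空ではない行を日付および名前ごとにカウント
--     for row in data:
--         if len(row) >= 4:
--             result, name, date, sheet_name = row[0], row[1], row[2], row[3]
--         else:
--             # 後方互換性のため、シート名がない場合は空文字を設定
--             result, name, date = row[0], row[1], row[2]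
--             sheet_name = ""
--         if result:  # 結果が空ではない場合
--             date_name_count[date][name] += 1
--
--     # 集計結果を返却
--     out_data = {}
--     for date, name_counts in sorted(date_name_count.items()):
--         daily_count = {}
--         for name, count in sorted(name_counts.items()):
--             daily_count[name] = count
--         out_data[date] = daily_count
--     return out_data
-- ===== SOURCE B (Python) =====
-- def get_daily_by_name(data):
--     # (date, name) of every row with a valid date and a truthy result
--     pairs = [(row[2], row[1]) for row in data
--              if len(row) > 2 and row[2] not in ("", None) and row[0]]
--     # sort-then-scan: walk the sorted distinct (date, name) keys once, opening a
--     # fresh group whenever the date changes (dates are consecutive in the sorted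
--     # key list, so each date is flushed into out exactly once, and the names of a
--     # date arrive in sorted order, each once)
--     out = {}
--     cur_date, cur_names = None, None
--     for date, name in sorted(set(pairs)):
--         if date != cur_date:
--             if cur_date is not None:
--                 out[cur_date] = cur_names
--             cur_date, cur_names = date, {}
--         cur_names[name] = pairs.count((date, name))
--     if cur_date is not None:
--         out[cur_date] = cur_names
--     return out
-- ===== Notes on version B (the rewrite author's own statement) =====
-- stated objective: alternative
-- what changed: Replaces A's nested defaultdict counting pass plus per-level sorted() dict rebuilds by a sort-then-scan pipeline: collect the (date, name) pairs of qualifying rows, sort the distinct pairs once lexicographically, and build the output in one linear scan that opens a new date group whenever the date changes, with no counter dicts at all. Pre_ excludes inputs where some counted row (valid date, truthy result) has name None, since there A's returned dict has a None key that is not a String (and A's sorted() raises TypeError when a date mixes None and string names).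
-- outside the precondition, e.g. on get_daily_by_name([['x', None, 'd']]): A returns {'d': {None: 1}}, B returns {'d': {None: 1}}
import Mathlib
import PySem

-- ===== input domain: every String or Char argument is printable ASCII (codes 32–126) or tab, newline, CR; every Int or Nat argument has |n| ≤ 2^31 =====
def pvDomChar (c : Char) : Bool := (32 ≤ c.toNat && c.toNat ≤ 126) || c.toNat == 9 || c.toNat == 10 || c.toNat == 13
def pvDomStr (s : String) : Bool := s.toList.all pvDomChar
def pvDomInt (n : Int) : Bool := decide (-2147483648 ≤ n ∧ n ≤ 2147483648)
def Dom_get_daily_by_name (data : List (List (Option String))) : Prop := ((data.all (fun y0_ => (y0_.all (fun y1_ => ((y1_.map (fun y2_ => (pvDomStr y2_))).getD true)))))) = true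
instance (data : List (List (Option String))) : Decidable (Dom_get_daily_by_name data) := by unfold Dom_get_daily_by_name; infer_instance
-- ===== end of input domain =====

-- B replaces A's nested-defaultdict counting plus per-level sorted() rebuilds by a
-- single lexicographic sort of the distinct (date, name) keys followed by one
-- linear grouping scan (alternative algorithm, not claimed faster).

-- Python truthiness of an Optional[str]: None and "" are falsy.
def pyTruthyOptStr (o : Option String) : Bool :=
  match o with
  | some s => decide (s ≠ "")
  | none => false

-- ===== PORT A =====
def get_daily_by_name (data : List (List (Option String))) : List (String × List (String × Int)) :=
  -- data = [row for row in data if len(row) > 2 and row[2] not in ("", None)]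
  let data1 := data.filter (fun row =>
    decide (2 < row.length) && !(PySem.List.pyGetD row 2 none == some "") &&
      !(PySem.List.pyGetD row 2 none == none))
  -- counting loop; the len(row) >= 4 branch only additionally binds the unused
  -- sheet_name, so result/name/date are extracted identically on both branches.
  -- Keys: under Pre_ every counted row has a string name and a non-empty string
  -- date, so '.getD ""' never fires on a counted row and keys are exact.
  let dnc := data1.foldl
    (fun d row =>
      if pyTruthyOptStr (PySem.List.pyGetD row 0 none) then
        d.modify ((PySem.List.pyGetD row 2 none).getD "") PySem.Dict.empty
          (fun inner => inner.modify ((PySem.List.pyGetD row 1 none).getD "") 0 (· + 1))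
      else d)
    PySem.Dict.empty
  -- sorted(date_name_count.items()) / sorted(name_counts.items()): the keys are
  -- unique, so Python's tuple sort never compares the second components and is
  -- exactly the stable sort by the key.
  let outer := PySem.List.sorted dnc.items (fun p => p.1) false
  (outer.foldl
      (fun out p =>
        out.insert p.1
          (((PySem.List.sorted p.2.items (fun q => q.1) false).foldl
              (fun dc q => dc.insert q.1 q.2) PySem.Dict.empty).items))
      PySem.Dict.empty).items

-- ===== PORT B =====
-- B's loop body: flush the current (date, names) group when the date changes,
-- else append; 'out' and the group's name list grow by APPENDS only — exact for
-- the Python dicts because equal dates are consecutive in the sorted key list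
-- (each date is flushed exactly once) and each name of a date occurs once.
def pvStepB (P : List (String × String))
    (s : List (String × List (String × Int)) × Option (String × List (String × Int)))
    (p : String × String) :
    List (String × List (String × Int)) × Option (String × List (String × Int)) :=
  match s.2 with
  | none => (s.1, some (p.1, [(p.2, (P.count p : Int))]))
  | some g =>
    if p.1 == g.1 then (s.1, some (g.1, g.2 ++ [(p.2, (P.count p : Int))]))
    else (s.1 ++ [g], some (p.1, [(p.2, (P.count p : Int))]))

-- the trailing 'if cur_date is not None: out[cur_date] = cur_names'
def pvFlush (s : List (String × List (String × Int)) × Option (String × List (String × Int))) :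
    List (String × List (String × Int)) :=
  match s.2 with
  | some g => s.1 ++ [g]
  | none => s.1

def get_daily_by_name_alt (data : List (List (Option String))) : List (String × List (String × Int)) :=
  let pairs := (data.filter (fun row =>
      decide (2 < row.length) && !(PySem.List.pyGetD row 2 none == some "") &&
        !(PySem.List.pyGetD row 2 none == none) &&
        pyTruthyOptStr (PySem.List.pyGetD row 0 none))).map
    (fun row => ((PySem.List.pyGetD row 2 none).getD "", (PySem.List.pyGetD row 1 none).getD ""))
  -- sorted(set(pairs)): Python's lexicographic sort of the distinct tuples
  let keys := PySem.List.sorted2 (PySem.Set.ofList pairs) (fun p => p.1) (fun p => p.2) false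
  pvFlush (keys.foldl (pvStepB pairs) ([], none))

-- ===== PRECONDITION & SPEC =====
-- Pre_ excludes inputs where some counted row (valid date, truthy result) has
-- name None: there A's output carries a None dict key, which is not a String
-- (and A's sorted() raises TypeError when a date mixes None and string names).
def Pre_get_daily_by_name (data : List (List (Option String))) : Prop :=
  ∀ row ∈ data,
    (2 < row.length ∧ PySem.List.pyGetD row 2 none ≠ some "" ∧
      PySem.List.pyGetD row 2 none ≠ none ∧
      (PySem.List.pyGetD row 0 none ≠ none ∧ PySem.List.pyGetD row 0 none ≠ some "")) →
    PySem.List.pyGetD row 1 none ≠ none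
instance (data : List (List (Option String))) : Decidable (Pre_get_daily_by_name data) := by
  unfold Pre_get_daily_by_name; infer_instance

def pvWitness_get_daily_by_name : List (List (Option String)) :=
  [[some "1", some "alice", some "2024-01-01"],
   [some "", some "bob", some "2024-01-01"],
   [some "1", some "alice", some "2024-01-02"]]

def Spec_get_daily_by_name (data : List (List (Option String))) (out : List (String × List (String × Int))) : Prop := out = get_daily_by_name_alt data
instance (data : List (List (Option String))) (out : List (String × List (String × Int))) : Decidable (Spec_get_daily_by_name data out) := by unfold Spec_get_daily_by_name; infer_instance

-- ===== CLAIM (what is proved, stated in full; the proofs are below) =====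
def Claim_equal_get_daily_by_name : Prop := ∀ (data : List (List (Option String))), Dom_get_daily_by_name data → Pre_get_daily_by_name data → Spec_get_daily_by_name data (get_daily_by_name data)

-- ===== LEMMAS AND PROOFS =====

-- A's counting step on a (date, name) pair
def pvStep (d : PySem.Dict String (PySem.Dict String Int)) (p : String × String) :
    PySem.Dict String (PySem.Dict String Int) :=
  d.modify p.1 PySem.Dict.empty (fun inner => inner.modify p.2 0 (· + 1))

-- names of the qualifying pairs of one date, and the two sorted key lists
def pvNames (P : List (String × String)) (dt : String) : List String :=
  (P.filter (fun p => p.1 == dt)).map (fun p => p.2)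

def pvDates (P : List (String × String)) : List String :=
  PySem.List.sorted (PySem.Set.ofList (P.map (fun p => p.1))) (fun x => x) false

def pvSortedN (P : List (String × String)) (dt : String) : List String :=
  PySem.List.sorted (PySem.Set.ofList (pvNames P dt)) (fun x => x) false

def pvKeys (P : List (String × String)) : List (String × String) :=
  (pvDates P).flatMap (fun dt => (pvSortedN P dt).map (fun nm => (dt, nm)))

-- a guarded fold is the fold over the filtered-and-mapped list
theorem pv_foldl_guard {α β γ : Type} (g : α → Bool) (ext : α → β) (f : γ → β → γ) :
    ∀ (rows : List α) (d : γ),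
      rows.foldl (fun d r => if g r then f d (ext r) else d) d
        = ((rows.filter g).map ext).foldl f d := by
  intro rows
  induction rows with
  | nil => intro d; rfl
  | cons r rows ih =>
    intro d
    by_cases h : g r = true
    · simp [h, ih]
    · simp [h, ih]

theorem pv_getD_nested (L : List (String × String)) :
    ∀ (d : PySem.Dict String (PySem.Dict String Int)) (dt : String),
      (L.foldl pvStep d).getD dt PySem.Dict.empty
        = ((L.filter (fun p => p.1 == dt)).map (fun p => p.2)).foldl
            (fun inn nm => inn.modify nm 0 (· + 1)) (d.getD dt PySem.Dict.empty) := by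
  induction L with
  | nil => intro d dt; rfl
  | cons p L ih =>
    intro d dt
    by_cases h : p.1 = dt
    · subst h
      simp [List.foldl_cons, ih, pvStep]
    · have hb : (p.1 == dt) = false := by simpa using h
      have hne : dt ≠ p.1 := fun e => h e.symm
      simp [List.foldl_cons, ih, pvStep, PySem.Dict.getD_modify, hb, hne]

-- keys of the nested counting fold, and their Nodup
theorem pv_keys_nested (L : List (String × String)) :
    (L.foldl pvStep PySem.Dict.empty).keys = PySem.Set.ofList (L.map (fun p => p.1)) := by
  have h := PySem.Dict.keys_foldl_modify_key L (fun p => p.1)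
    (PySem.Dict.empty (κ := String) (ν := Int))
    (fun _ p inner => inner.modify p.2 0 (· + 1)) PySem.Dict.empty
  show (List.foldl (fun d p => pvStep d p) PySem.Dict.empty L).keys = _
  simp only [pvStep]
  have h2 : PySem.Set.update (PySem.Dict.empty (κ := String) (ν := PySem.Dict String Int)).keys
        (List.map (fun p : String × String => p.1) L)
      = PySem.Set.ofList (L.map (fun p => p.1)) := by
    simp [PySem.Set.update, PySem.Set.ofList, PySem.Dict.keys_empty]
  exact h.trans h2

theorem pv_nodup_keys_nested (L : List (String × String)) :
    (L.foldl pvStep PySem.Dict.empty).keys.Nodup := by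
  rw [pv_keys_nested]; exact PySem.Set.nodup_ofList _

-- sorting a pair list with strictly-increasing-after-dedup firsts
theorem pv_sorted_map_fst {ν : Type} (xs : List String) (g : String → ν) :
    PySem.List.sorted ((PySem.Set.ofList xs).map (fun k => (k, g k))) (fun p => p.1) false
      = (PySem.List.sorted (PySem.Set.ofList xs) (fun x => x) false).map (fun k => (k, g k)) := by
  apply PySem.List.sorted_eq_of_perm_of_pairwise_lt
  · exact (PySem.List.sorted_perm (PySem.Set.ofList xs) (fun x => x) false).map _
  · have h := PySem.List.sorted_ofList_pairwise_lt (κ := String) xs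
    exact (List.pairwise_map).mpr h

-- rebuilding a dict from distinct plain keys is the key-value map
theorem pv_rebuild_key {ν : Type} (l : List String) (v : String → ν) (h : l.Nodup) :
    (l.foldl (fun dc k => dc.insert k (v k)) PySem.Dict.empty).items
      = l.map (fun k => (k, v k)) := by
  have := PySem.Dict.items_foldl_insert_fresh l (fun k => k) v
    PySem.Dict.empty (by intro a _; rfl) (by simpa using h)
  simpa using this

-- sorted(set(xs)) has no duplicates
theorem pv_nodup_sorted_set (xs : List String) :
    (PySem.List.sorted (PySem.Set.ofList xs) (fun x => x) false).Nodup :=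
  ((PySem.List.sorted_perm (PySem.Set.ofList xs) (fun x => x) false).nodup_iff).mpr
    (PySem.Set.nodup_ofList xs)

-- A's inner dict, rebuilt from the sorted counter items, in map normal form
theorem pv_innerMap (ns : List String) :
    ((PySem.List.sorted (PySem.Dict.counter ns).items (fun q => q.1) false).foldl
        (fun dc q => dc.insert q.1 q.2) PySem.Dict.empty).items
      = (PySem.List.sorted (PySem.Set.ofList ns) (fun x => x) false).map
          (fun nm => (nm, (ns.count nm : Int))) := by
  rw [PySem.Dict.items_counter, pv_sorted_map_fst, List.foldl_map,
    pv_rebuild_key _ _ (pv_nodup_sorted_set ns)]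

-- A's whole output pipeline, in map normal form
theorem pv_A_norm (P : List (String × String)) :
    ((PySem.List.sorted (P.foldl pvStep PySem.Dict.empty).items (fun p => p.1) false).foldl
        (fun out p =>
          out.insert p.1
            (((PySem.List.sorted p.2.items (fun q => q.1) false).foldl
                (fun dc q => dc.insert q.1 q.2) PySem.Dict.empty).items))
        PySem.Dict.empty).items
    = (pvDates P).map (fun dt =>
        (dt, (pvSortedN P dt).map (fun nm => (nm, ((pvNames P dt).count nm : Int))))) := by
  have hitems : (P.foldl pvStep PySem.Dict.empty).items
      = (PySem.Set.ofList (P.map (fun p => p.1))).map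
          (fun dt => (dt, PySem.Dict.counter (pvNames P dt))) := by
    rw [PySem.Dict.items_eq_map_keys _ (pv_nodup_keys_nested P) PySem.Dict.empty,
      pv_keys_nested]
    refine List.map_congr_left ?_
    intro dt _
    rw [pv_getD_nested P PySem.Dict.empty dt]
    simp only [PySem.Dict.getD_empty]
    rfl
  rw [hitems, pv_sorted_map_fst, List.foldl_map,
    pv_rebuild_key _ _ (pv_nodup_sorted_set (P.map (fun p => p.1)))]
  refine List.map_congr_left ?_
  intro dt _
  exact congrArg (fun z => (dt, z)) (pv_innerMap _)

-- A's guarded counting loop over the date-filtered rows is the nested fold over B's pair list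
theorem pv_pairs (data : List (List (Option String))) :
    (data.filter (fun row =>
        decide (2 < row.length) && !(PySem.List.pyGetD row 2 none == some "") &&
          !(PySem.List.pyGetD row 2 none == none))).foldl
      (fun d row =>
        if pyTruthyOptStr (PySem.List.pyGetD row 0 none) then
          d.modify ((PySem.List.pyGetD row 2 none).getD "") PySem.Dict.empty
            (fun inner => inner.modify ((PySem.List.pyGetD row 1 none).getD "") 0 (· + 1))
        else d)
      PySem.Dict.empty
    = (((data.filter (fun row =>
          decide (2 < row.length) && !(PySem.List.pyGetD row 2 none == some "") &&
            !(PySem.List.pyGetD row 2 none == none) &&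
            pyTruthyOptStr (PySem.List.pyGetD row 0 none))).map
        (fun row => ((PySem.List.pyGetD row 2 none).getD "", (PySem.List.pyGetD row 1 none).getD ""))).foldl
        pvStep PySem.Dict.empty) := by
  have hA : (fun (d : PySem.Dict String (PySem.Dict String Int)) (row : List (Option String)) =>
        if pyTruthyOptStr (PySem.List.pyGetD row 0 none) then
          d.modify ((PySem.List.pyGetD row 2 none).getD "") PySem.Dict.empty
            (fun inner => inner.modify ((PySem.List.pyGetD row 1 none).getD "") 0 (· + 1))
        else d)
      = (fun d row =>
          if pyTruthyOptStr (PySem.List.pyGetD row 0 none) then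
            pvStep d ((PySem.List.pyGetD row 2 none).getD "", (PySem.List.pyGetD row 1 none).getD "")
          else d) := rfl
  rw [hA, pv_foldl_guard (fun row => pyTruthyOptStr (PySem.List.pyGetD row 0 none))
    (fun row => ((PySem.List.pyGetD row 2 none).getD "", (PySem.List.pyGetD row 1 none).getD ""))
    pvStep, List.filter_filter]
  refine congrArg (List.foldl pvStep PySem.Dict.empty) (congrArg (List.map _) (List.filter_congr ?_))
  intro a _
  exact Bool.and_comm _ _

-- ===== B-side lemmas =====

-- sorted2 on pairs is the single-key stable sort under the lexicographic order
theorem pv_sorted2_eq (xs : List (String × String)) :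
    PySem.List.sorted2 xs (fun p => p.1) (fun p => p.2) false
      = PySem.List.sorted xs (fun p => toLex (p.1, p.2)) false := by
  show List.foldl (fun acc x => PySem.List.insertBy _ x acc) [] xs
      = List.foldl (fun acc x => PySem.List.insertBy _ x acc) [] xs
  have h : (fun a b : String × String =>
        decide (a.1 < b.1) || (!decide (b.1 < a.1) && decide (a.2 < b.2)))
      = (fun a b : String × String =>
        decide ((toLex (a.1, a.2) : Lex (String × String)) < toLex (b.1, b.2))) := by
    funext a b
    rcases lt_trichotomy a.1 b.1 with h1 | h1 | h1
    · simp [h1, Prod.Lex.lt_iff, asymm h1]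
    · simp [h1, Prod.Lex.lt_iff]
    · simp [Prod.Lex.lt_iff, h1, asymm h1, h1.ne']
  rw [h]

-- the canonical key list is strictly increasing lexicographically
theorem pv_keys_pairwise (P : List (String × String)) :
    (pvKeys P).Pairwise (fun a b => (toLex (a.1, a.2) : Lex (String × String)) < toLex (b.1, b.2)) := by
  rw [pvKeys, List.pairwise_flatMap]
  constructor
  · intro dt _
    refine List.pairwise_map.mpr ?_
    refine (PySem.List.sorted_ofList_pairwise_lt (pvNames P dt)).imp ?_
    intro a b hab
    exact Prod.Lex.lt_iff.mpr (Or.inr ⟨rfl, hab⟩)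
  · refine (PySem.List.sorted_ofList_pairwise_lt (P.map (fun p => p.1))).imp ?_
    intro a b hab x hx y hy
    obtain ⟨_, _, rfl⟩ := List.mem_map.mp hx
    obtain ⟨_, _, rfl⟩ := List.mem_map.mp hy
    exact Prod.Lex.lt_iff.mpr (Or.inl hab)

theorem pv_keys_nodup (P : List (String × String)) : (pvKeys P).Nodup := by
  refine (pv_keys_pairwise P).imp ?_
  intro a b hab
  rintro rfl
  exact lt_irrefl _ hab

theorem pv_mem_keys (P : List (String × String)) (z : String × String) :
    z ∈ pvKeys P ↔ z ∈ P := by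
  simp only [pvKeys, List.mem_flatMap, List.mem_map, pvDates, pvSortedN,
    PySem.List.mem_sorted, PySem.Set.mem_ofList, pvNames, List.mem_filter]
  constructor
  · rintro ⟨dt, -, nm, ⟨p, ⟨hp, hdt⟩, rfl⟩, rfl⟩
    simpa [← (beq_iff_eq.mp hdt)] using hp
  · intro hz
    exact ⟨z.1, ⟨z, hz, rfl⟩, z.2, ⟨z, ⟨hz, by simp⟩, rfl⟩, rfl⟩

theorem pv_keys_perm (P : List (String × String)) :
    (pvKeys P).Perm (PySem.Set.ofList P) := by
  rw [List.perm_ext_iff_of_nodup (pv_keys_nodup P) (PySem.Set.nodup_ofList P)]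
  intro z
  rw [pv_mem_keys, PySem.Set.mem_ofList]

-- sorted(set(pairs)) IS the canonical key list
theorem pv_sorted_keys (P : List (String × String)) :
    PySem.List.sorted2 (PySem.Set.ofList P) (fun p => p.1) (fun p => p.2) false = pvKeys P := by
  rw [pv_sorted2_eq]
  exact PySem.List.sorted_eq_of_perm_of_pairwise_lt _ _ _ (pv_keys_perm P) (pv_keys_pairwise P)

-- absorbing one date's block of keys into the current group
theorem pv_block (P : List (String × String)) (dt : String) :
    ∀ (ns : List String) (out : List (String × List (String × Int))) (acc : List (String × Int)),
      List.foldl (pvStepB P) (out, some (dt, acc)) (ns.map (fun nm => (dt, nm)))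
        = (out, some (dt, acc ++ ns.map (fun nm => (nm, (P.count (dt, nm) : Int))))) := by
  intro ns
  induction ns with
  | nil => intro out acc; simp
  | cons n ns ih =>
    intro out acc
    simp only [List.map_cons, List.foldl_cons, pvStepB, beq_self_eq_true, if_true]
    rw [ih]
    simp

-- the grouping scan over the blocks of consecutive dates
theorem pv_scan (P : List (String × String)) :
    ∀ (D : List String) (out : List (String × List (String × Int)))
      (g : String × List (String × Int)),
      (g.1 :: D).IsChain (· ≠ ·) →
      (∀ dt ∈ D, pvSortedN P dt ≠ []) →
      pvFlush (List.foldl (pvStepB P) (out, some g)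
          (D.flatMap (fun dt => (pvSortedN P dt).map (fun nm => (dt, nm)))))
        = out ++ g :: D.map (fun dt =>
            (dt, (pvSortedN P dt).map (fun nm => (nm, (P.count (dt, nm) : Int))))) := by
  intro D
  induction D with
  | nil => intro out g _ _; simp [pvFlush]
  | cons dt D ih =>
    intro out g hch hne
    obtain ⟨n0, ns, hN⟩ : ∃ n0 ns, pvSortedN P dt = n0 :: ns := by
      cases h : pvSortedN P dt with
      | nil => exact absurd h (hne dt (by simp))
      | cons a b => exact ⟨a, b, rfl⟩
    have hgd : g.1 ≠ dt := (List.isChain_cons_cons.mp hch).1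
    rw [List.flatMap_cons, hN]
    simp only [List.map_cons, List.cons_append, List.foldl_cons]
    have h1 : pvStepB P (out, some g) (dt, n0)
        = (out ++ [g], some (dt, [(n0, (P.count (dt, n0) : Int))])) := by
      simp [pvStepB, beq_eq_false_iff_ne.mpr (Ne.symm hgd)]
    rw [h1, List.foldl_append, pv_block]
    have h2 := ih (out ++ [g])
      (dt, [(n0, (P.count (dt, n0) : Int))] ++ ns.map (fun nm => (nm, (P.count (dt, nm) : Int))))
      ((List.isChain_cons_cons.mp hch).2) (fun d hd => hne d (by simp [hd]))
    simp only at h2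
    rw [h2]
    simp [hN]

theorem pv_sortedN_ne_nil (P : List (String × String)) (dt : String)
    (h : dt ∈ P.map (fun p => p.1)) : pvSortedN P dt ≠ [] := by
  obtain ⟨p, hp, rfl⟩ := List.mem_map.mp h
  have hm : p.2 ∈ pvNames P p.1 := by
    simp only [pvNames, List.mem_map, List.mem_filter]
    exact ⟨p, ⟨hp, by simp⟩, rfl⟩
  have : p.2 ∈ pvSortedN P p.1 := by
    rw [pvSortedN, PySem.List.mem_sorted, PySem.Set.mem_ofList]; exact hm
  exact List.ne_nil_of_mem this

theorem pv_dates_mem (P : List (String × String)) (dt : String) (h : dt ∈ pvDates P) :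
    dt ∈ P.map (fun p => p.1) := by
  rw [pvDates, PySem.List.mem_sorted, PySem.Set.mem_ofList] at h; exact h

-- B's scan in map normal form
theorem pv_B_norm (P : List (String × String)) :
    pvFlush (List.foldl (pvStepB P) ([], none) (pvKeys P))
      = (pvDates P).map (fun dt =>
          (dt, (pvSortedN P dt).map (fun nm => (nm, (P.count (dt, nm) : Int))))) := by
  have hch : (pvDates P).IsChain (· ≠ ·) := by
    refine List.Pairwise.isChain ?_
    exact (PySem.List.sorted_ofList_pairwise_lt (P.map (fun p => p.1))).imp (fun h => ne_of_lt h)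
  cases hD : pvDates P with
  | nil => simp [pvKeys, hD, pvFlush]
  | cons d Ds =>
    obtain ⟨n0, ns, hN⟩ : ∃ n0 ns, pvSortedN P d = n0 :: ns := by
      cases h : pvSortedN P d with
      | nil =>
        exact absurd h (pv_sortedN_ne_nil P d (pv_dates_mem P d (by rw [hD]; simp)))
      | cons a b => exact ⟨a, b, rfl⟩
    rw [pvKeys, hD, List.flatMap_cons, hN]
    simp only [List.map_cons, List.cons_append, List.foldl_cons]
    have h1 : pvStepB P ([], none) (d, n0)
        = ([], some (d, [(n0, (P.count (d, n0) : Int))])) := by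
      simp [pvStepB]
    rw [h1, List.foldl_append, pv_block]
    have hch' : (d :: Ds).IsChain (fun a b : String => a ≠ b) := by
      rw [hD] at hch; exact hch
    have h2 := pv_scan P Ds []
      (d, [(n0, (P.count (d, n0) : Int))] ++ ns.map (fun nm => (nm, (P.count (d, nm) : Int)))) hch'
      (fun dd hd => pv_sortedN_ne_nil P dd (pv_dates_mem P dd (by rw [hD]; simp [hd])))
    simp only at h2
    rw [h2]
    simp [hN]

-- counting a name within one date's rows is counting the pair
theorem pv_count_pair (P : List (String × String)) (dt nm : String) :
    (pvNames P dt).count nm = P.count (dt, nm) := by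
  induction P with
  | nil => rfl
  | cons p P ih =>
    by_cases h1 : p.1 = dt
    · by_cases h2 : p.2 = nm
      · have hp : p = (dt, nm) := Prod.ext h1 h2
        simp [pvNames, hp, ← ih, pvNames]
      · have hp : p ≠ (dt, nm) := by simp [Prod.ext_iff, h2]
        simp [pvNames, h1, h2, hp, ← ih, pvNames]
    · have hp : p ≠ (dt, nm) := by simp [Prod.ext_iff, h1]
      simp [pvNames, h1, hp, ← ih, pvNames]

-- the two ports agree on every input
theorem pv_equiv (data : List (List (Option String))) :
    get_daily_by_name data = get_daily_by_name_alt data := by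
  simp only [get_daily_by_name, get_daily_by_name_alt]
  rw [pv_pairs data, pv_A_norm, pv_sorted_keys, pv_B_norm]
  refine List.map_congr_left ?_
  intro dt _
  refine congrArg (fun z => (dt, z)) (List.map_congr_left ?_)
  intro nm _
  rw [pv_count_pair]

-- ===== VERDICT (by name: the statement is the Claim_ definition above) =====
theorem get_daily_by_name_spec : Claim_equal_get_daily_by_name := by
  intro data _ _
  unfold Spec_get_daily_by_name
  exact pv_equiv data
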